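-- pv_equiv track=rewrite | github.com/danielenricocahall/AdventOfCode2020 | problem11.py | get_all_bottom_diagonal
-- ===== SOURCE A (Python) =====
-- def get_all_bottom_diagonal(row: int, col: int, seats: list):
--     neighborhood = []
--     left_col = col - 1
--     right_col = col + 1
--     found_left = False
--     found_right = False
--     left_row = None
--     right_row = None
--     row += 1
--     while row < len(seats):
--         if left_col >= 0 and not found_left:
--             if seats[row][left_col] in ['L', '#']:
--                 neighborhood.append(seats[row][left_col])
--                 found_left = True
--                 left_row = row
--             else:
--                 left_col -= 1
--         if right_col < len(seats[row]) and not found_right: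
--             if seats[row][right_col] in ['L', '#']:
--                 neighborhood.append(seats[row][right_col])
--                 found_right = True
--                 right_row = row
--             else:
--                 right_col += 1
--         if found_left and found_right:
--             break
--         row += 1
--     return left_row, left_col, right_row, right_col, neighborhood
-- ===== SOURCE B (Python) =====
-- def _ray(row, col, seats, step):
--     # walk rows downward from row+1; move col by step while the ray is active
--     r = row + 1
--     while r < len(seats):
--         if (col >= 0) if step < 0 else (col < len(seats[r])):
--             cell = seats[r][col]
--             if cell in ('L', '#'):
--                 return r, col, cell
--             col += step
--         r += 1
--     return None, col, None
--
--
-- def get_all_bottom_diagonal(row: int, col: int, seats: list):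
--     lr, lc, lch = _ray(row, col - 1, seats, -1)
--     rr, rc, rch = _ray(row, col + 1, seats, 1)
--     if lr is not None and rr is not None:
--         neighborhood = [lch, rch] if lr <= rr else [rch, lch]
--     elif lr is not None:
--         neighborhood = [lch]
--     elif rr is not None:
--         neighborhood = [rch]
--     else:
--         neighborhood = []
--     return lr, lc, rr, rc, neighborhood
-- ===== Notes on version B (the rewrite author's own statement) =====
-- stated objective: alternative
-- what changed: A's single interleaved while-loop tracking both diagonal rays with found-flags and a break is replaced by one reusable ray-walker helper called once per direction, with the neighborhood list reconstructed afterwards by comparing the two discovery rows (left before right on ties).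
-- outside the precondition, e.g. on get_all_bottom_diagonal(-1, 2, [['x', 'L'], []]): A returns (0, 1, None, 3, ['L']), B returns (0, 1, None, 3, ['L'])
import Mathlib
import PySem

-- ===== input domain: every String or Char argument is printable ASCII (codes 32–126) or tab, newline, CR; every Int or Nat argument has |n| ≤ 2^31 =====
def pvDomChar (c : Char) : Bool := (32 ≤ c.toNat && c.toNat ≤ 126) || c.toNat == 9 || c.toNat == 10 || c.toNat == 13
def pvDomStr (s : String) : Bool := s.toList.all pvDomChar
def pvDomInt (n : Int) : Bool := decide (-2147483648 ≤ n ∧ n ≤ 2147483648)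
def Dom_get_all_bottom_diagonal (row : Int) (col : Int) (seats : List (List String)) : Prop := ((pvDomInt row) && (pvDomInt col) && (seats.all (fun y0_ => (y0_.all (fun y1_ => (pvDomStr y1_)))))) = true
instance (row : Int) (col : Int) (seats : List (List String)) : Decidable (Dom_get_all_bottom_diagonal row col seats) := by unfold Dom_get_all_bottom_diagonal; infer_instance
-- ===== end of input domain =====

-- B replaces A's interleaved two-flag while-loop by a single ray-walker helper called once
-- per diagonal direction, merging the two results afterwards (alternative decomposition,
-- same cost); equivalence is about the return value.

-- ===== PORT A =====
-- one iteration's left-diagonal step: returns (left_col, found_left, left_row, neighborhood)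
def pvStepL (rowl : List String) (r lc : Int) (fl : Bool) (lrow : Option Int) (nb : List String) :
    Int × Bool × Option Int × List String :=
  if 0 ≤ lc ∧ fl = false then
    let c := (PySem.List.pyGet? rowl lc).getD ""
    if c = "L" ∨ c = "#" then (lc, true, some r, nb ++ [c]) else (lc - 1, fl, lrow, nb)
  else (lc, fl, lrow, nb)

-- one iteration's right-diagonal step: returns (right_col, found_right, right_row, neighborhood)
def pvStepR (rowl : List String) (r rc : Int) (fr : Bool) (rrow : Option Int) (nb : List String) :
    Int × Bool × Option Int × List String :=
  if rc < (rowl.length : Int) ∧ fr = false then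
    let c := (PySem.List.pyGet? rowl rc).getD ""
    if c = "L" ∨ c = "#" then (rc, true, some r, nb ++ [c]) else (rc + 1, fr, rrow, nb)
  else (rc, fr, rrow, nb)

-- A's while-loop; fuel counts the remaining iterations (len(seats) - row)
def pvLoopA (seats : List (List String)) :
    Nat → Int → Int → Int → Bool → Bool → Option Int → Option Int → List String →
    Option Int × Int × Option Int × Int × List String
  | 0, _, lc, rc, _, _, lrow, rrow, nb => (lrow, lc, rrow, rc, nb)
  | fuel + 1, r, lc, rc, fl, fr, lrow, rrow, nb =>
    let rowl := (PySem.List.pyGet? seats r).getD []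
    let sL := pvStepL rowl r lc fl lrow nb
    let sR := pvStepR rowl r rc fr rrow sL.2.2.2
    if sL.2.1 = true ∧ sR.2.1 = true then (sL.2.2.1, sL.1, sR.2.2.1, sR.1, sR.2.2.2)
    else pvLoopA seats fuel (r + 1) sL.1 sR.1 sL.2.1 sR.2.1 sL.2.2.1 sR.2.2.1 sR.2.2.2

def get_all_bottom_diagonal (row : Int) (col : Int) (seats : List (List String)) :
    Option Int × Int × Option Int × Int × List String :=
  pvLoopA seats ((seats.length : Int) - (row + 1)).toNat (row + 1) (col - 1) (col + 1) false false none none []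

-- ===== PORT B =====
-- Source B's _ray: walk rows downward from r, moving col by step while the ray is active
def pvRay (seats : List (List String)) (step : Int) :
    Nat → Int → Int → Option Int × Int × Option String
  | 0, _, c => (none, c, none)
  | fuel + 1, r, c =>
    let rowl := (PySem.List.pyGet? seats r).getD []
    if (if step < 0 then 0 ≤ c else c < (rowl.length : Int)) then
      let cell := (PySem.List.pyGet? rowl c).getD ""
      if cell = "L" ∨ cell = "#" then (some r, c, some cell)
      else pvRay seats step fuel (r + 1) (c + step)
    else pvRay seats step fuel (r + 1) c

-- Source B's if/elif merge of the two discovery results into the neighborhood list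
def pvMergeNb (lr : Option Int) (lch : Option String) (rr : Option Int) (rch : Option String) :
    List String :=
  match lr, rr with
  | some a, some b => if a ≤ b then [lch.getD "", rch.getD ""] else [rch.getD "", lch.getD ""]
  | some _, none => [lch.getD ""]
  | none, some _ => [rch.getD ""]
  | none, none => []

def get_all_bottom_diagonal_alt (row : Int) (col : Int) (seats : List (List String)) :
    Option Int × Int × Option Int × Int × List String :=
  let fuel := ((seats.length : Int) - (row + 1)).toNat
  let L := pvRay seats (-1) fuel (row + 1) (col - 1)
  let R := pvRay seats 1 fuel (row + 1) (col + 1)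
  (L.1, L.2.1, R.1, R.2.1, pvMergeNb L.1 L.2.2 R.1 R.2.2)

-- ===== PRECONDITION & SPEC =====
-- Pre_ excludes exactly the inputs on which A raises IndexError: a first visited row index
-- below -len(seats), or a visited row too short for the left (resp. wrapped right) column
-- the ray would hold there; it is slightly conservative (it ignores that a ray that already
-- found a seat stops indexing), so it also excludes a few inputs where A still returns.
def Pre_get_all_bottom_diagonal (row : Int) (col : Int) (seats : List (List String)) : Prop :=
  (row + 1 ≥ -(seats.length : Int) ∨ row + 1 ≥ (seats.length : Int)) ∧
  (∀ k : Nat, k < ((seats.length : Int) - (row + 1)).toNat →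
    (0 ≤ col - 1 - (k : Int) →
      col - 1 - (k : Int) < (((PySem.List.pyGet? seats (row + 1 + k)).getD []).length : Int)) ∧
    (col + 1 + (k : Int) < 0 →
      -(col + 1 + (k : Int)) ≤ (((PySem.List.pyGet? seats (row + 1 + k)).getD []).length : Int)))
instance (row : Int) (col : Int) (seats : List (List String)) : Decidable (Pre_get_all_bottom_diagonal row col seats) := by unfold Pre_get_all_bottom_diagonal; infer_instance
def pvWitness_get_all_bottom_diagonal : Int × Int × List (List String) := (-1, 1, [["x", "L"], ["#", "."]])
def Spec_get_all_bottom_diagonal (row : Int) (col : Int) (seats : List (List String)) (out : Option Int × Int × Option Int × Int × List String) : Prop := out = get_all_bottom_diagonal_alt row col seats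
instance (row : Int) (col : Int) (seats : List (List String)) (out : Option Int × Int × Option Int × Int × List String) : Decidable (Spec_get_all_bottom_diagonal row col seats out) := by unfold Spec_get_all_bottom_diagonal; infer_instance

-- ===== CLAIM (what is proved, stated in full; the proofs are below) =====
def Claim_equal_get_all_bottom_diagonal : Prop := ∀ (row : Int) (col : Int) (seats : List (List String)), Dom_get_all_bottom_diagonal row col seats → Pre_get_all_bottom_diagonal row col seats → Spec_get_all_bottom_diagonal row col seats (get_all_bottom_diagonal row col seats)

-- ===== LEMMAS AND PROOFS =====

-- a ray that finds a seat finds it at or below its starting row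
theorem pvRay_row_ge (seats : List (List String)) (step : Int) :
    ∀ (fuel : Nat) (r c : Int) (a : Int) (c' : Int) (ch : Option String),
      pvRay seats step fuel r c = (some a, c', ch) → r ≤ a := by
  intro fuel
  induction fuel with
  | zero => intro r c a c' ch h; simp [pvRay] at h
  | succ n ih =>
    intro r c a c' ch h
    simp only [pvRay] at h
    split_ifs at h
    all_goals
      first
        | (simp only [Prod.mk.injEq, Option.some.injEq] at h; omega)
        | exact le_trans (by omega) (ih _ _ _ _ _ h)

-- once the left ray has found its seat, the loop is exactly the right ray
theorem pvLoopA_onlyRight (seats : List (List String)) :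
    ∀ (fuel : Nat) (r lc rc a : Int) (nb : List String),
      pvLoopA seats fuel r lc rc true false (some a) none nb =
        (match pvRay seats 1 fuel r rc with
         | (some b, rc', ch) => (some a, lc, some b, rc', nb ++ [ch.getD ""])
         | (none, rc', _) => (some a, lc, none, rc', nb)) := by
  intro fuel
  induction fuel with
  | zero => intro r lc rc a nb; simp [pvLoopA, pvRay]
  | succ n ih =>
    intro r lc rc a nb
    simp only [pvLoopA, pvRay, pvStepL, pvStepR]
    by_cases h1 : rc < (((PySem.List.pyGet? seats r).getD []).length : Int)
    · by_cases h2 : ((PySem.List.pyGet? ((PySem.List.pyGet? seats r).getD []) rc).getD "") = "L" ∨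
          ((PySem.List.pyGet? ((PySem.List.pyGet? seats r).getD []) rc).getD "") = "#"
      · simp [h1, h2]
      · simp [h1, h2, ih]
    · simp [h1, ih]

-- once the right ray has found its seat, the loop is exactly the left ray
theorem pvLoopA_onlyLeft (seats : List (List String)) :
    ∀ (fuel : Nat) (r lc rc b : Int) (nb : List String),
      pvLoopA seats fuel r lc rc false true none (some b) nb =
        (match pvRay seats (-1) fuel r lc with
         | (some a, lc', ch) => (some a, lc', some b, rc, nb ++ [ch.getD ""])
         | (none, lc', _) => (none, lc', some b, rc, nb)) := by
  intro fuel
  induction fuel with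
  | zero => intro r lc rc b nb; simp [pvLoopA, pvRay]
  | succ n ih =>
    intro r lc rc b nb
    simp only [pvLoopA, pvRay, pvStepL, pvStepR]
    by_cases h1 : 0 ≤ lc
    · by_cases h2 : ((PySem.List.pyGet? ((PySem.List.pyGet? seats r).getD []) lc).getD "") = "L" ∨
          ((PySem.List.pyGet? ((PySem.List.pyGet? seats r).getD []) lc).getD "") = "#"
      · simp [h1, h2]
      · simp [h1, h2, ih, sub_eq_add_neg]
    · simp [h1, ih]

-- the interleaved loop equals the two independent rays merged by discovery row
theorem pvLoopA_eq_rays (seats : List (List String)) :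
    ∀ (fuel : Nat) (r lc rc : Int) (nb : List String),
      pvLoopA seats fuel r lc rc false false none none nb =
        (let L := pvRay seats (-1) fuel r lc
         let R := pvRay seats 1 fuel r rc
         (L.1, L.2.1, R.1, R.2.1, nb ++ pvMergeNb L.1 L.2.2 R.1 R.2.2)) := by
  intro fuel
  induction fuel with
  | zero => intro r lc rc nb; simp [pvLoopA, pvRay, pvMergeNb]
  | succ n ih =>
    intro r lc rc nb
    simp only [pvLoopA, pvRay, pvStepL, pvStepR]
    by_cases hl : 0 ≤ lc
    · by_cases hsl : ((PySem.List.pyGet? ((PySem.List.pyGet? seats r).getD []) lc).getD "") = "L" ∨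
          ((PySem.List.pyGet? ((PySem.List.pyGet? seats r).getD []) lc).getD "") = "#"
      · -- left found now
        by_cases hr : rc < (((PySem.List.pyGet? seats r).getD []).length : Int)
        · by_cases hsr : ((PySem.List.pyGet? ((PySem.List.pyGet? seats r).getD []) rc).getD "") = "L" ∨
              ((PySem.List.pyGet? ((PySem.List.pyGet? seats r).getD []) rc).getD "") = "#"
          · simp [hl, hsl, hr, hsr, pvMergeNb]
          · rcases h : pvRay seats 1 n (r + 1) (rc + 1) with ⟨orr, rc', rch⟩
            cases orr with
            | none => simp [pvLoopA_onlyRight, pvMergeNb, hl, hsl, hr, hsr, h]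
            | some b =>
              have hb : r + 1 ≤ b := pvRay_row_ge seats 1 n (r + 1) (rc + 1) b rc' rch h
              simp [pvLoopA_onlyRight, pvMergeNb, hl, hsl, hr, hsr, h, show r ≤ b by omega]
        · rcases h : pvRay seats 1 n (r + 1) rc with ⟨orr, rc', rch⟩
          cases orr with
          | none => simp [pvLoopA_onlyRight, pvMergeNb, hl, hsl, hr, h]
          | some b =>
            have hb : r + 1 ≤ b := pvRay_row_ge seats 1 n (r + 1) rc b rc' rch h
            simp [pvLoopA_onlyRight, pvMergeNb, hl, hsl, hr, h, show r ≤ b by omega]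
      · -- left steps on
        by_cases hr : rc < (((PySem.List.pyGet? seats r).getD []).length : Int)
        · by_cases hsr : ((PySem.List.pyGet? ((PySem.List.pyGet? seats r).getD []) rc).getD "") = "L" ∨
              ((PySem.List.pyGet? ((PySem.List.pyGet? seats r).getD []) rc).getD "") = "#"
          · rcases h : pvRay seats (-1) n (r + 1) (lc + -1) with ⟨olr, lc', lch⟩
            cases olr with
            | none => simp [pvLoopA_onlyLeft, pvMergeNb, hl, hsl, hr, hsr, h, sub_eq_add_neg]
            | some a =>
              have ha : r + 1 ≤ a := pvRay_row_ge seats (-1) n (r + 1) (lc + -1) a lc' lch h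
              simp [pvLoopA_onlyLeft, pvMergeNb, hl, hsl, hr, hsr, h, sub_eq_add_neg,
                show ¬ a ≤ r by omega]
          · simp [hl, hsl, hr, hsr, ih, show lc + -1 = lc - 1 by ring]
        · simp [hl, hsl, hr, ih, show lc + -1 = lc - 1 by ring]
    · -- left inactive this row
      by_cases hr : rc < (((PySem.List.pyGet? seats r).getD []).length : Int)
      · by_cases hsr : ((PySem.List.pyGet? ((PySem.List.pyGet? seats r).getD []) rc).getD "") = "L" ∨
            ((PySem.List.pyGet? ((PySem.List.pyGet? seats r).getD []) rc).getD "") = "#"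
        · rcases h : pvRay seats (-1) n (r + 1) lc with ⟨olr, lc', lch⟩
          cases olr with
          | none => simp [pvLoopA_onlyLeft, pvMergeNb, hl, hr, hsr, h]
          | some a =>
            have ha : r + 1 ≤ a := pvRay_row_ge seats (-1) n (r + 1) lc a lc' lch h
            simp [pvLoopA_onlyLeft, pvMergeNb, hl, hr, hsr, h, show ¬ a ≤ r by omega]
        · simp [hl, hr, hsr, ih]
      · simp [hl, hr, ih]

-- ===== VERDICT (by name: the statement is the Claim_ definition above) =====
theorem get_all_bottom_diagonal_spec : Claim_equal_get_all_bottom_diagonal := by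
  intro row col seats _ _
  unfold Spec_get_all_bottom_diagonal get_all_bottom_diagonal get_all_bottom_diagonal_alt
  simp [pvLoopA_eq_rays]
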